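-- pv_equiv track=rewrite | github.com/tiendat8438/Python | Variables & Data types/SỐ LỘC PHÁT ĐẸP.py | check
-- ===== SOURCE A (Python) =====
-- def check(n):
--     if any(n[i] not in ['6', '8'] for i in range(len(n))):
--         return 'NO'
--     i = 0
--     while i < len(n):
--         if i + 3 <= len(n) and n[i:i + 3] == '688':
--             i += 3
--         elif i + 2 <= len(n) and n[i:i + 2] == '68':
--             i += 2
--         elif n[i] == '6':
--             i += 1
--         else:
--             return "NO"
--     return "YES"
-- ===== SOURCE B (Python) =====
-- def check(n):
--     if n == '':
--         return 'YES'
--     if any(c not in '68' for c in n) or n[0] != '6' or '888' in n: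
--         return 'NO'
--     return 'YES'
-- ===== Notes on version B (the rewrite author's own statement) =====
-- stated objective: simpler
-- what changed: Replaced the greedy 688/68/6 token-parsing while-loop with three direct predicate checks: every character in '68', first character '6', and no '888' substring (empty string is YES).
import Mathlib
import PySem

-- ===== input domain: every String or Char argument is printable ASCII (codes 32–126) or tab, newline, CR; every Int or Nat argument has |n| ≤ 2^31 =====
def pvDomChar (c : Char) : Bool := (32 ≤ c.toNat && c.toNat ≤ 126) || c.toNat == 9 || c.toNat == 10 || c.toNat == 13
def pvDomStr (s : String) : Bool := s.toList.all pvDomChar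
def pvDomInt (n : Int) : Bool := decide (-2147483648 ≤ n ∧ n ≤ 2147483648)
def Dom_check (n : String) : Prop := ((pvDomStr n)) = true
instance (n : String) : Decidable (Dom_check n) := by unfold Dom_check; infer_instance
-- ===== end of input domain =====

-- B replaces A's greedy 688/68/6 token-parsing loop by three direct predicate
-- checks (all chars in '68', first char '6', no '888' substring): simpler, same O(n) cost.

-- ===== PORT A =====
-- A's while-loop over index i, transliterated as structural recursion on the
-- suffix n[i:]; the three branches compare the same prefixes in the same order.
def checkLoop : List Char → String
  | [] => "YES"
  | '6' :: '8' :: '8' :: t => checkLoop t      -- n[i:i+3] == '688'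
  | '6' :: '8' :: t => checkLoop t             -- n[i:i+2] == '68'
  | '6' :: t => checkLoop t                    -- n[i] == '6'
  | _ => "NO"

def check (n : String) : String :=
  if n.toList.any (fun c => !(c == '6' || c == '8')) then "NO"
  else checkLoop n.toList

-- ===== PORT B =====
-- '888' in n
def has888 : List Char → Bool
  | '8' :: '8' :: '8' :: _ => true
  | _ :: t => has888 t
  | [] => false

def check_alt (n : String) : String :=
  match n.toList with
  | [] => "YES"
  | c :: _ =>
    if n.toList.any (fun ch => !(ch == '6' || ch == '8')) || c != '6' || has888 n.toList
    then "NO" else "YES"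

-- ===== PRECONDITION & SPEC =====
def Spec_check (n : String) (out : String) : Prop := out = check_alt n
instance (n : String) (out : String) : Decidable (Spec_check n out) := by unfold Spec_check; infer_instance

-- ===== CLAIM (what is proved, stated in full; the proofs are below) =====
def Claim_equal_check : Prop := ∀ (n : String), Dom_check n → Spec_check n (check n)

-- ===== LEMMAS AND PROOFS =====

-- On strings over {6,8}, the greedy loop returns YES iff the string is empty
-- or starts with '6' and has no run of three 8's.
theorem checkLoop_char (l : List Char) (h : ∀ c ∈ l, c = '6' ∨ c = '8') :
    checkLoop l = (match l with
      | [] => "YES"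
      | c :: _ => if c = '6' ∧ has888 l = false then "YES" else "NO") := by
  induction l using checkLoop.induct with
  | case1 => simp [checkLoop]
  | case2 t ih =>
    have ht : ∀ c ∈ t, c = '6' ∨ c = '8' := fun c hc => h c (by simp [hc])
    rw [checkLoop, ih ht]
    rcases t with _ | ⟨c, t'⟩
    · simp [has888]
    · rcases ht c (by simp) with rfl | rfl
      · simp [has888]
      · simp [checkLoop, has888]
  | case3 t hne ih =>
    -- '6' :: '8' :: t, with t not starting '8' (previous pattern failed)
    have ht : ∀ c ∈ t, c = '6' ∨ c = '8' := fun c hc => h c (by simp [hc])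
    rw [checkLoop, ih ht]
    rcases t with _ | ⟨c, t'⟩
    · simp [has888]
    · rcases ht c (by simp) with rfl | rfl
      · simp [has888]
      · exact absurd rfl (fun h => hne t' h)
    exact hne
  | case4 t hne3 hne2 ih =>
    -- '6' :: t, with t not starting '8'
    have ht : ∀ c ∈ t, c = '6' ∨ c = '8' := fun c hc => h c (by simp [hc])
    rw [checkLoop, ih ht]
    rcases t with _ | ⟨c, t'⟩
    · simp [has888]
    · rcases ht c (by simp) with rfl | rfl
      · simp [has888]
      · exact absurd rfl (fun h => hne2 t' h)
    exact hne3
    exact hne2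
  | case5 l h1 h2 h3 h4 =>
    -- head is not '6' (and list nonempty)
    rcases l with _ | ⟨c, t⟩
    · exact (h1 rfl).elim
    · rcases h c (by simp) with rfl | rfl
      · exact (h4 t rfl).elim
      · simp [checkLoop]

-- ===== VERDICT (by name: the statement is the Claim_ definition above) =====
theorem check_spec : Claim_equal_check := by
  intro n _
  unfold Spec_check check check_alt
  generalize n.toList = l
  by_cases hb : l.any (fun c => !(c == '6' || c == '8')) = true
  · rw [if_pos hb]
    rcases l with _ | ⟨c, t⟩
    · simp at hb
    · rw [hb]
      simp
  · have hb' : l.any (fun c => !(c == '6' || c == '8')) = false := by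
      simpa using hb
    have hall : ∀ c ∈ l, c = '6' ∨ c = '8' := by
      intro c hc
      have h := (List.any_eq_false.mp hb') c hc
      simp only [Bool.not_eq_true', Bool.not_eq_false] at h
      rcases Bool.or_eq_true_iff.mp h with h | h
      · exact Or.inl (by simpa using h)
      · exact Or.inr (by simpa using h)
    rw [if_neg hb, checkLoop_char _ hall]
    rcases l with _ | ⟨c, t⟩
    · rfl
    · rcases hall c (by simp) with rfl | rfl
      · by_cases h8 : has888 ('6' :: t) = true
        · simp [h8]
        · simp [h8]
          intro x hx hx6
          exact (hall x (by simp [hx])).resolve_left hx6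
      · simp
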